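-- pv_equiv track=rewrite | github.com/lexoz-bedra/algorithms-ICT | s2/2-4-substrings/2-4-podstroki-lexoz-bedra-main/Задачи по варианту/task8.py | find_mistakes
-- ===== SOURCE A (Python) =====
-- def find_mistakes(data):
--     results = []
--
--     for query in data:
--         mistake_range = query[0]
--         string = query[1]
--         substring = query[2]
--
--         result = []
--
--         for i in range(len(string) - len(substring) + 1):
--             mistakes = 0
--
--             for j in range(len(substring)):
--                 part_of_string = string[i + j]
--                 part_of_substring = substring[j]
--
--                 if part_of_string != part_of_substring:
--                     mistakes += 1
--
--                 if mistakes > mistake_range: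
--                     break
--
--             if mistakes == mistake_range:
--                 result.append(i)
--
--         if len(result) == 0:
--             results.append([0])
--         else:
--             results.append([len(result)] + result)
--
--     return results
-- ===== SOURCE B (Python) =====
-- def _query(k, s, t):
--     w = len(s) - len(t) + 1
--     if w <= 0:
--         return [0]
--     # column-wise accumulation: slide each pattern position across all windows
--     mism = [0] * w
--     for j, tc in enumerate(t):
--         mism = [c + (sc != tc) for c, sc in zip(mism, s[j:j + w])]
--     hits = [i for i, c in enumerate(mism) if c == k]
--     return [len(hits)] + hits if hits else [0]
--
--
-- def find_mistakes(data):
--     return [_query(k, s, t) for k, s, t in data]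
-- ===== Notes on version B (the rewrite author's own statement) =====
-- stated objective: alternative
-- what changed: A scans each window row-wise with an early-break mismatch counter and appends matching positions as it goes; B transposes the loops, sliding each pattern position over all windows to accumulate a per-window mismatch-count array column-wise, then filters that array for counts equal to k.
import Mathlib
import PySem

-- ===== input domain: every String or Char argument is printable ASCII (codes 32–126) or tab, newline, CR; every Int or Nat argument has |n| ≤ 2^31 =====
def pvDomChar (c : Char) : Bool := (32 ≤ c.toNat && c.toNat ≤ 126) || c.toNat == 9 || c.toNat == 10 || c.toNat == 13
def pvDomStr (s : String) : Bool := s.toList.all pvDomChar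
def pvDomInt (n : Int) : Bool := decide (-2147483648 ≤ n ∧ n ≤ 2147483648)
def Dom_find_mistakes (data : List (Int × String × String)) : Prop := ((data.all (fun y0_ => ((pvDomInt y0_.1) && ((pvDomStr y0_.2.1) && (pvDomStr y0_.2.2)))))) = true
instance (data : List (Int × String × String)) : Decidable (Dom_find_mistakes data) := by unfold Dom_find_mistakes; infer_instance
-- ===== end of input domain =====

-- B re-implements A with transposed loops (per-pattern-position column accumulation instead of
-- per-window row scans with early break); same cost class, equivalence of return values proved below.

-- ===== PORT A =====
-- inner `for j in range(len(substring))` loop with its early `break`; on every reachable call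
-- the indices i+j and j are in range (i comes from range(len(string)-len(substring)+1)),
-- so pyGetD with a default is exact there.
def pvLoopA (k : Int) (sl tl : List Char) (i : Int) (j : Nat) (mistakes : Int) : Int :=
  if j < tl.length then
    let part_of_string := PySem.List.pyGetD sl (i + (j : Int)) ' '
    let part_of_substring := PySem.List.pyGetD tl ((j : Int)) ' '
    let mistakes' := if part_of_string ≠ part_of_substring then mistakes + 1 else mistakes
    if mistakes' > k then mistakes'
    else pvLoopA k sl tl i (j + 1) mistakes'
  else mistakes
termination_by tl.length - j

-- body of A's outer `for query in data` loop
def pvQueryA (query : Int × String × String) : List Int :=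
  let mistake_range := query.1
  let sl := query.2.1.toList
  let tl := query.2.2.toList
  let result :=
    (PySem.List.pyRange 0 ((sl.length : Int) - (tl.length : Int) + 1)).foldl
      (fun result i =>
        if pvLoopA mistake_range sl tl i 0 0 = mistake_range then result ++ [i] else result) []
  if result.length = 0 then [0] else ((result.length : Int) :: result)

def find_mistakes (data : List (Int × String × String)) : List (List Int) :=
  data.foldl (fun results query => results ++ [pvQueryA query]) []

-- ===== PORT B =====
-- one step of B's `for j, tc in enumerate(t)` loop: the zip/list-comprehension update of mism
def pvStepB (sl : List Char) (wn : Nat) (mism : List Int) (jtc : Int × Char) : List Int :=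
  (mism.zip (PySem.List.slice sl (some jtc.1) (some (jtc.1 + (wn : Int))))).map
    (fun csc => csc.1 + (if csc.2 ≠ jtc.2 then 1 else 0))

-- B's `_query`
def pvQueryB (q : Int × String × String) : List Int :=
  let k := q.1
  let sl := q.2.1.toList
  let tl := q.2.2.toList
  let w : Int := (sl.length : Int) - (tl.length : Int) + 1
  if w ≤ 0 then [0]
  else
    let wn := w.toNat
    let mism := (PySem.List.enumerate tl).foldl (pvStepB sl wn) (List.replicate wn 0)
    let hits := ((PySem.List.enumerate mism).filter (fun p => p.2 == k)).map (fun p => p.1)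
    if hits = [] then [0] else ((hits.length : Int) :: hits)

def find_mistakes_alt (data : List (Int × String × String)) : List (List Int) :=
  data.map (fun q => pvQueryB q)

-- ===== PRECONDITION & SPEC =====
def Spec_find_mistakes (data : List (Int × String × String)) (out : List (List Int)) : Prop := out = find_mistakes_alt data
instance (data : List (Int × String × String)) (out : List (List Int)) : Decidable (Spec_find_mistakes data out) := by unfold Spec_find_mistakes; infer_instance

-- ===== CLAIM (what is proved, stated in full; the proofs are below) =====
def Claim_equal_find_mistakes : Prop := ∀ (data : List (Int × String × String)), Dom_find_mistakes data → Spec_find_mistakes data (find_mistakes data)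

-- ===== LEMMAS AND PROOFS =====

-- exact number of mismatches of window i against pattern positions j0, j0+1, …, m-1
def pvCnt (sl tl : List Char) (i j0 : Nat) : Int :=
  (((List.range' j0 (tl.length - j0)).countP
      (fun j => decide (sl.getD (i + j) ' ' ≠ tl.getD j ' '))) : Int)

theorem pvCnt_nonneg (sl tl : List Char) (i j0 : Nat) : 0 ≤ pvCnt sl tl i j0 := by
  simp [pvCnt]

theorem pvCnt_end (sl tl : List Char) (i j0 : Nat) (h : tl.length ≤ j0) :
    pvCnt sl tl i j0 = 0 := by
  simp [pvCnt, Nat.sub_eq_zero_of_le h]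

theorem pvCnt_succ (sl tl : List Char) (i j0 : Nat) (h : j0 < tl.length) :
    pvCnt sl tl i j0 =
      (if sl.getD (i + j0) ' ' ≠ tl.getD j0 ' ' then 1 else 0) + pvCnt sl tl i (j0 + 1) := by
  have hs : tl.length - j0 = (tl.length - (j0 + 1)) + 1 := by omega
  rw [pvCnt, hs, List.range'_succ, List.countP_cons]
  simp [pvCnt]
  split_ifs <;> simp_all <;> try omega

-- A's inner loop returns k exactly when the number of remaining mismatches plus the accumulator equals k
theorem pvLoopA_eq_iff (k : Int) (sl tl : List Char) (i : Nat) :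
    ∀ d j0 acc, tl.length - j0 = d →
      (pvLoopA k sl tl (i : Int) j0 acc = k ↔ acc + pvCnt sl tl i j0 = k) := by
  intro d
  induction d with
  | zero =>
    intro j0 acc hd
    have hj : ¬ j0 < tl.length := by omega
    rw [pvLoopA, if_neg hj, pvCnt_end sl tl i j0 (by omega)]
    omega
  | succ d ih =>
    intro j0 acc hd
    have hj : j0 < tl.length := by omega
    rw [pvLoopA, if_pos hj]
    have hcast : (i : Int) + (j0 : Int) = ((i + j0 : Nat) : Int) := by push_cast; ring
    rw [hcast, PySem.List.pyGetD_natCast, PySem.List.pyGetD_natCast]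
    rw [pvCnt_succ sl tl i j0 hj]
    have hnn := pvCnt_nonneg sl tl i (j0 + 1)
    by_cases hne : sl.getD (i + j0) ' ' ≠ tl.getD j0 ' '
    · simp only [if_pos hne]
      by_cases hgt : acc + 1 > k
      · rw [if_pos hgt]; constructor <;> intro h <;> omega
      · rw [if_neg hgt, ih (j0 + 1) (acc + 1) (by omega)]; omega
    · simp only [if_neg hne]
      by_cases hgt : acc > k
      · rw [if_pos hgt]; constructor <;> intro h <;> omega
      · rw [if_neg hgt, ih (j0 + 1) acc (by omega)]; omega

-- the slice s[j:j+w] written as a map over window indices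
theorem pvSlice_eq_map (sl : List Char) (wn j : Nat) (hjw : j + wn ≤ sl.length) :
    PySem.List.slice sl (some (j : Int)) (some ((j : Int) + (wn : Int)))
      = (List.range wn).map (fun i => sl.getD (j + i) ' ') := by
  have hc : (j : Int) + (wn : Int) = ((j + wn : Nat) : Int) := by push_cast; ring
  rw [hc, PySem.List.slice_natCast]
  have hlen : j + wn - j = wn := by omega
  rw [hlen]
  apply List.ext_getElem
  · simp; omega
  · intro n h1 h2
    simp only [List.getElem_take, List.getElem_drop, List.getElem_map, List.getElem_range]
    rw [List.getD_eq_getElem sl ' ' (by simp at h2 ⊢; omega)]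

-- enumerate of a map over range, with matching start
theorem pvEnum_map_range' {β : Type} (f : Nat → β) :
    ∀ (wn a : Nat), PySem.List.enumerate ((List.range' a wn).map f) (a : Int)
      = (List.range' a wn).map (fun (i : Nat) => ((i : Int), f i)) := by
  intro wn
  induction wn with
  | zero => intro a; simp
  | succ n ih =>
    intro a
    rw [List.range'_succ, List.map_cons, PySem.List.enumerate_cons, List.map_cons]
    have : (a : Int) + 1 = ((a + 1 : Nat) : Int) := by push_cast; ring
    rw [this, ih (a + 1)]

-- B's fold over enumerate(t) accumulates exactly the mismatch counts
theorem pvFoldB (sl tl : List Char) (wn : Nat) (hwn : wn + tl.length ≤ sl.length + 1) :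
    ∀ (rem : List Char) (j : Nat) (g : Nat → Int), rem = tl.drop j → j + rem.length = tl.length →
      (PySem.List.enumerate rem (j : Int)).foldl (pvStepB sl wn) ((List.range wn).map g)
        = (List.range wn).map (fun i => g i + pvCnt sl tl i j) := by
  intro rem
  induction rem with
  | nil =>
    intro j g hdrop hlen
    simp only [List.length_nil] at hlen
    rw [PySem.List.enumerate_nil, List.foldl_nil]
    apply List.map_congr_left
    intro i _
    rw [pvCnt_end sl tl i j (by omega)]; ring
  | cons tc rem' ih =>
    intro j g hdrop hlen
    have hj : j < tl.length := by simp at hlen; omega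
    rw [PySem.List.enumerate_cons, List.foldl_cons]
    have hstep : pvStepB sl wn ((List.range wn).map g) ((j : Int), tc)
        = (List.range wn).map (fun i => g i + (if sl.getD (i + j) ' ' ≠ tl.getD j ' ' then 1 else 0)) := by
      have htc : tl.getD j ' ' = tc := by
        have hd2 : tl.drop j = tc :: rem' := hdrop.symm
        have hsome : tl[j]? = some tc := by
          rw [← List.head?_drop, hd2]; rfl
        rw [List.getD_eq_getElem?_getD, hsome]; rfl
      rw [pvStepB]
      simp only
      rw [pvSlice_eq_map sl wn j (by omega), List.zip_map', List.map_map]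
      apply List.map_congr_left
      intro i _
      simp only [Function.comp]
      rw [htc]
      simp [Nat.add_comm]
    rw [hstep]
    have hnext : ((j : Int) + 1) = ((j + 1 : Nat) : Int) := by push_cast; ring
    rw [hnext, ih (j + 1) _ (by rw [← List.drop_drop, ← hdrop]; rfl) (by simp at hlen ⊢; omega)]
    apply List.map_congr_left
    intro i _
    rw [pvCnt_succ sl tl i j hj]; ring

-- per-query equality
theorem pvQuery_eq (q : Int × String × String) : pvQueryA q = pvQueryB q := by
  obtain ⟨k, s, t⟩ := q
  simp only [pvQueryA, pvQueryB]
  set sl := s.toList with hsl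
  set tl := t.toList with htl
  by_cases hneg : (sl.length : Int) - (tl.length : Int) + 1 ≤ 0
  · rw [PySem.List.pyRange_one_eq_nil hneg, List.foldl_nil, if_pos hneg]
    simp
  · rw [if_neg hneg]
    set wn : Nat := ((sl.length : Int) - (tl.length : Int) + 1).toNat with hwn
    have hwn' : wn + tl.length ≤ sl.length + 1 := by omega
    -- A's result list
    have hA : (PySem.List.pyRange 0 ((sl.length : Int) - (tl.length : Int) + 1)).foldl
        (fun result i => if pvLoopA k sl tl i 0 0 = k then result ++ [i] else result) []
        = ((List.range wn).filter (fun i => pvCnt sl tl i 0 == k)).map (fun (i : Nat) => (i : Int)) := by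
      rw [PySem.List.pyRange_one, List.foldl_map]
      have hfold := PySem.List.foldl_append_if
        (fun i : Nat => decide (pvLoopA k sl tl ((0 : Int) + (i : Int)) 0 0 = k))
        (fun i : Nat => (0 : Int) + (i : Int)) (List.range ((sl.length : Int) - (tl.length : Int) + 1 - 0).toNat) []
      simp only [decide_eq_true_eq] at hfold
      rw [hfold]
      have hr : ((sl.length : Int) - (tl.length : Int) + 1 - 0).toNat = wn := by omega
      rw [hr, List.nil_append]
      have hp : ∀ i ∈ List.range wn, (decide (pvLoopA k sl tl ((0 : Int) + (i : Int)) 0 0 = k))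
          = (pvCnt sl tl i 0 == k) := by
        intro i _
        have hz : (0 : Int) + (i : Int) = (i : Int) := by ring
        rw [hz]
        rcases pvLoopA_eq_iff k sl tl i (tl.length - 0) 0 0 rfl with h
        simp only [zero_add] at h
        by_cases hc : pvCnt sl tl i 0 = k
        · simp [h, hc]
        · simp [h, hc]
      rw [List.filter_congr hp]
      apply List.map_congr_left; intro i _; ring
    -- B's mism list
    have hrep : List.replicate wn (0 : Int) = (List.range wn).map (fun _ => (0 : Int)) := by
      rw [List.map_const', List.length_range]
    have hB : (PySem.List.enumerate tl).foldl (pvStepB sl wn) (List.replicate wn 0)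
        = (List.range wn).map (fun i => pvCnt sl tl i 0) := by
      rw [hrep]
      have h := pvFoldB sl tl wn hwn' tl 0 (fun _ => (0 : Int)) (by simp) (by simp)
      simpa using h
    rw [hA, hB]
    -- hits computation
    have henum : PySem.List.enumerate ((List.range wn).map (fun i => pvCnt sl tl i 0)) 0
        = (List.range wn).map (fun (i : Nat) => ((i : Int), pvCnt sl tl i 0)) := by
      have h := pvEnum_map_range' (fun i => pvCnt sl tl i 0) wn 0
      simpa [List.range_eq_range'] using h
    rw [henum, List.filter_map, List.map_map]
    have hpe : ((fun p : Int × Int => p.2 == k) ∘ fun (i : Nat) => ((i : Int), pvCnt sl tl i 0))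
        = (fun (i : Nat) => pvCnt sl tl i 0 == k) := by
      funext i; rfl
    have hfe : ((fun p : Int × Int => p.1) ∘ fun (i : Nat) => ((i : Int), pvCnt sl tl i 0))
        = (fun (i : Nat) => (i : Int)) := by
      funext i; rfl
    rw [hpe, hfe]
    rcases h : ((List.range wn).filter (fun i => pvCnt sl tl i 0 == k)) with _ | ⟨x, xs⟩
    · simp
    · simp

-- ===== VERDICT (by name: the statement is the Claim_ definition above) =====
theorem find_mistakes_spec : Claim_equal_find_mistakes := by
  intro data _
  unfold Spec_find_mistakes find_mistakes find_mistakes_alt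
  rw [PySem.List.foldl_append_singleton_eq_map, List.nil_append]
  exact List.map_congr_left (fun q _ => pvQuery_eq q)
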